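-- pv_equiv track=rewrite | github.com/AilingLiu/hackerrank | collections_Counter.py | calPrice
-- ===== SOURCE A (Python) =====
-- from collections import Counter
--
-- def calPrice(shoes_arr, buy_arr, price_arr):
--
--     total = 0
--
--     shoes_stock = Counter(shoes_arr)
--
--     for i in range(len(buy_arr)):
--         if shoes_stock[buy_arr[i]]:
--             total += price_arr[i]
--             shoes_stock[buy_arr[i]]-=1
--
--     return total
-- ===== SOURCE B (Python) =====
-- from collections import Counter
--
-- def calPrice(shoes_arr, buy_arr, price_arr):
--     stock = Counter(shoes_arr)
--     groups = {}
--     for shoe, price in zip(buy_arr, price_arr):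
--         groups.setdefault(shoe, []).append(price)
--     total = 0
--     for shoe, prices in groups.items():
--         total += sum(prices[:stock[shoe]])
--     return total
-- ===== Notes on version B (the rewrite author's own statement) =====
-- stated objective: alternative
-- what changed: Replaces the interleaved index loop that decrements a stock counter per purchase by a group-then-sum pass: zip buys with prices, group prices by shoe type in buy order, then for each shoe sum the first stock-count prices of its group.
-- outside the precondition, e.g. on calPrice([], [1], []): A returns 0, B returns 0
import Mathlib
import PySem

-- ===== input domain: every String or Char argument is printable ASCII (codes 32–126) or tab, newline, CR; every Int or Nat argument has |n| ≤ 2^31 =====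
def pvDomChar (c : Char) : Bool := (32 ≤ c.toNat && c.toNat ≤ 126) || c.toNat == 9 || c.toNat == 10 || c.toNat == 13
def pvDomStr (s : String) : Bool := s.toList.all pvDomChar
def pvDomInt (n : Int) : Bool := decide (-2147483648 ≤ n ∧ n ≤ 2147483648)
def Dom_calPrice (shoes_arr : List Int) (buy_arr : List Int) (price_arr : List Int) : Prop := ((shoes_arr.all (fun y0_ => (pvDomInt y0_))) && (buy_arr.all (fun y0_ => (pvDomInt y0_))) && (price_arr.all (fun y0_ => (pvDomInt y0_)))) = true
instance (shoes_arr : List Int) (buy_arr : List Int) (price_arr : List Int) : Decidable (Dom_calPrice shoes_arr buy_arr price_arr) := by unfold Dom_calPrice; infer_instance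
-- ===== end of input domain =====

-- B restructures A's interleaved stock-decrementing index loop into a group-by-shoe pass followed by a per-group prefix sum (objective: alternative).


-- ===== PORT A =====
def calPrice (shoes_arr : List Int) (buy_arr : List Int) (price_arr : List Int) : Int :=
  -- total = 0; shoes_stock = Counter(shoes_arr); for i in range(len(buy_arr)): ...
  let shoes_stock : PySem.Dict Int Int := PySem.Dict.counter shoes_arr
  ((PySem.List.pyRange 0 (buy_arr.length : Int) 1).foldl
    (fun (st : Int × PySem.Dict Int Int) i =>
      if st.2.getD (PySem.List.pyGetD buy_arr i 0) 0 ≠ 0 then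
        (st.1 + PySem.List.pyGetD price_arr i 0,
         st.2.insert (PySem.List.pyGetD buy_arr i 0)
           (st.2.getD (PySem.List.pyGetD buy_arr i 0) 0 - 1))
      else st)
    (0, shoes_stock)).1

-- ===== PORT B =====
def calPrice_alt (shoes_arr : List Int) (buy_arr : List Int) (price_arr : List Int) : Int :=
  -- stock = Counter(shoes_arr); group prices by shoe over zip(buy, price); sum first stock[shoe] prices per group
  let stock : PySem.Dict Int Int := PySem.Dict.counter shoes_arr
  let groups : PySem.Dict Int (List Int) :=
    (buy_arr.zip price_arr).foldl
      (fun g p => g.modify p.1 [] (· ++ [p.2])) PySem.Dict.empty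
  groups.items.foldl
    (fun total kv => total + (PySem.List.slice kv.2 none (some (stock.getD kv.1 0))).sum) 0

-- ===== PRECONDITION & SPEC =====
-- A indexes price_arr[i] for each stocked purchase i, raising IndexError when price_arr is too
-- short; Pre_ requires len(buy_arr) ≤ len(price_arr), which also excludes some short-price
-- inputs on which A happens to return because no stocked purchase reaches a missing index (cited).
def Pre_calPrice (shoes_arr : List Int) (buy_arr : List Int) (price_arr : List Int) : Prop :=
  buy_arr.length ≤ price_arr.length
instance (shoes_arr : List Int) (buy_arr : List Int) (price_arr : List Int) : Decidable (Pre_calPrice shoes_arr buy_arr price_arr) := by unfold Pre_calPrice; infer_instance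

def pvWitness_calPrice : List Int × List Int × List Int := ([1, 2, 1], [1, 3, 1, 1], [10, 20, 30, 40])

def Spec_calPrice (shoes_arr : List Int) (buy_arr : List Int) (price_arr : List Int) (out : Int) : Prop := out = calPrice_alt shoes_arr buy_arr price_arr
instance (shoes_arr : List Int) (buy_arr : List Int) (price_arr : List Int) (out : Int) : Decidable (Spec_calPrice shoes_arr buy_arr price_arr out) := by unfold Spec_calPrice; infer_instance

-- ===== CLAIM (what is proved, stated in full; the proofs are below) =====
def Claim_equal_calPrice : Prop := ∀ (shoes_arr : List Int) (buy_arr : List Int) (price_arr : List Int), Dom_calPrice shoes_arr buy_arr price_arr → Pre_calPrice shoes_arr buy_arr price_arr → Spec_calPrice shoes_arr buy_arr price_arr (calPrice shoes_arr buy_arr price_arr)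

-- ===== LEMMAS AND PROOFS =====

-- prices requested for shoe k, in buy order
def pvPrices (k : Int) (l : List (Int × Int)) : List Int := (l.filter (fun p => p.1 == k)).map (·.2)

-- sum of the first c prices
def pvTake (c : Int) (ps : List Int) : Int := (ps.take c.toNat).sum

-- reference: the interleaved decrementing scan, with a function as stock state
def pvF (cnt : Int → Int) : List (Int × Int) → Int
  | [] => 0
  | (b, p) :: r =>
      if cnt b ≠ 0 then p + pvF (fun k => if k = b then cnt b - 1 else cnt k) r
      else pvF cnt r

lemma pvPrices_cons (k b p : Int) (r : List (Int × Int)) :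
    pvPrices k ((b, p) :: r) = if b = k then p :: pvPrices k r else pvPrices k r := by
  simp [pvPrices, List.filter_cons]
  split_ifs with h <;> simp_all

-- summing a pointwise-equal-except-at-b map
lemma pv_sum_update (K : List Int) (f g : Int → Int) (b : Int)
    (hnd : K.Nodup) (hb : b ∈ K) (h : ∀ k ∈ K, k ≠ b → f k = g k) :
    (K.map f).sum = (K.map g).sum + (f b - g b) := by
  induction K with
  | nil => cases hb
  | cons a K ih =>
    rcases List.mem_cons.mp hb with rfl | hb'
    · have : ∀ k ∈ K, f k = g k := fun k hk =>
        h k (List.mem_cons_of_mem _ hk) (fun hkb => (List.nodup_cons.mp hnd).1 (hkb ▸ hk))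
      simp [List.map_congr_left this]; ring
    · have hab : a ≠ b := fun hab => (List.nodup_cons.mp hnd).1 (hab ▸ hb')
      have := ih (List.nodup_cons.mp hnd).2 hb' (fun k hk => h k (List.mem_cons_of_mem _ hk))
      simp [this, h a (List.mem_cons_self) hab]; ring

lemma pvF_eq_sum (l : List (Int × Int)) : ∀ (cnt : Int → Int), (∀ x, 0 ≤ cnt x) →
    ∀ (K : List Int), K.Nodup → (∀ p ∈ l, p.1 ∈ K) →
    pvF cnt l = (K.map (fun k => pvTake (cnt k) (pvPrices k l))).sum := by
  induction l with
  | nil => intro cnt _ K _ _; simp [pvF, pvPrices, pvTake]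
  | cons hd r ih =>
    rcases hd with ⟨b, p⟩
    intro cnt hcnt K hnd hcov
    have hbK : b ∈ K := hcov (b, p) (List.mem_cons_self)
    have hcov' : ∀ q ∈ r, q.1 ∈ K := fun q hq => hcov q (List.mem_cons_of_mem _ hq)
    by_cases hb : cnt b = 0
    · have : pvF cnt ((b, p) :: r) = pvF cnt r := by simp [pvF, hb]
      rw [this, ih cnt hcnt K hnd hcov']
      refine congrArg _ (List.map_congr_left fun k hk => ?_)
      rw [pvPrices_cons]
      split_ifs with hkb
      · subst hkb; simp [pvTake, hb]
      · rfl
    · have hpos : 0 < cnt b := lt_of_le_of_ne (hcnt b) (Ne.symm hb)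
      set cnt' : Int → Int := fun k => if k = b then cnt b - 1 else cnt k with hcnt'
      have hcnt'pos : ∀ x, 0 ≤ cnt' x := by
        intro x; simp only [hcnt']; split_ifs <;> [omega; exact hcnt x]
      have hstep : pvF cnt ((b, p) :: r) = p + pvF cnt' r := by
        simp [pvF, hb]; rw [hcnt']
      rw [hstep, ih cnt' hcnt'pos K hnd hcov']
      have hsum := pv_sum_update K
        (fun k => pvTake (cnt k) (pvPrices k ((b, p) :: r)))
        (fun k => pvTake (cnt' k) (pvPrices k r)) b hnd hbK ?_
      · rw [hsum]
        have hfb : pvTake (cnt b) (pvPrices b ((b, p) :: r))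
            = p + pvTake (cnt' b) (pvPrices b r) := by
          have h1 : (cnt b).toNat = (cnt b - 1).toNat + 1 := by omega
          have h2 : cnt' b = cnt b - 1 := by rw [hcnt']; simp
          have hbb : pvPrices b ((b, p) :: r) = p :: pvPrices b r := by
            rw [pvPrices_cons, if_pos rfl]
          rw [hbb]
          simp only [pvTake, h2, h1, List.take_succ_cons, List.sum_cons]
        simp only [hfb]; ring
      · intro k hk hkb
        show pvTake (cnt k) (pvPrices k ((b, p) :: r)) = pvTake (cnt' k) (pvPrices k r)
        have h2 : cnt' k = cnt k := by rw [hcnt']; simp [hkb]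
        rw [pvPrices_cons, if_neg (fun h => hkb h.symm), h2]

-- A's loop from index j equals the reference scan on the dropped-zip suffix
lemma pvA_loop (buy price : List Int) (hlen : buy.length ≤ price.length) :
    ∀ (fuel : Nat) (j : Nat), buy.length - j ≤ fuel → ∀ (t : Int) (d : PySem.Dict Int Int),
    ((PySem.List.pyRange (j : Int) (buy.length : Int) 1).foldl
      (fun (st : Int × PySem.Dict Int Int) i =>
        if st.2.getD (PySem.List.pyGetD buy i 0) 0 ≠ 0 then
          (st.1 + PySem.List.pyGetD price i 0,
           st.2.insert (PySem.List.pyGetD buy i 0)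
             (st.2.getD (PySem.List.pyGetD buy i 0) 0 - 1))
        else st)
      (t, d)).1
    = t + pvF (fun k => d.getD k 0) ((buy.drop j).zip (price.drop j)) := by
  intro fuel
  induction fuel with
  | zero =>
    intro j hj t d
    have hge : buy.length ≤ j := by omega
    have hr : PySem.List.pyRange (j : Int) (buy.length : Int) 1 = [] := by
      simp [PySem.List.pyRange]; omega
    rw [hr]
    have : buy.drop j = [] := List.drop_eq_nil_of_le hge
    simp [this, pvF]
  | succ fuel ih =>
    intro j hj t d
    by_cases hjl : j < buy.length
    · have hjp : j < price.length := lt_of_lt_of_le hjl hlen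
      have hcons : PySem.List.pyRange (j : Int) (buy.length : Int) 1
          = (j : Int) :: PySem.List.pyRange ((j : Int) + 1) (buy.length : Int) 1 :=
        PySem.List.pyRange_one_cons (by exact_mod_cast hjl)
      have hbuyd : buy.drop j = buy[j] :: buy.drop (j + 1) :=
        List.drop_eq_getElem_cons hjl
      have hpriced : price.drop j = price[j] :: price.drop (j + 1) :=
        List.drop_eq_getElem_cons hjp
      have hgb : PySem.List.pyGetD buy (j : Int) 0 = buy[j] := by
        rw [PySem.List.pyGetD_natCast]; exact List.getD_eq_getElem buy 0 hjl
      have hgp : PySem.List.pyGetD price (j : Int) 0 = price[j] := by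
        rw [PySem.List.pyGetD_natCast]; exact List.getD_eq_getElem price 0 hjp
      have hcast : ((j : Int) + 1) = ((j + 1 : Nat) : Int) := by push_cast; ring
      rw [hcons, List.foldl_cons, hbuyd, hpriced, List.zip_cons_cons]
      simp only [hgb, hgp]
      by_cases hc : d.getD buy[j] 0 ≠ 0
      · rw [if_pos hc]
        have hR : pvF (fun k => d.getD k 0)
              ((buy[j], price[j]) :: (buy.drop (j + 1)).zip (price.drop (j + 1)))
            = price[j] + pvF (fun k => if k = buy[j] then d.getD buy[j] 0 - 1 else d.getD k 0)
                ((buy.drop (j + 1)).zip (price.drop (j + 1))) := by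
          simp only [pvF]; rw [if_pos hc]
        rw [hR, hcast, ih (j + 1) (by omega)]
        have hfn : (fun k => (d.insert buy[j] (d.getD buy[j] 0 - 1)).getD k 0)
            = fun k => if k = buy[j] then d.getD buy[j] 0 - 1 else d.getD k 0 := by
          funext k; rw [PySem.Dict.getD_insert]
        rw [hfn]; ring
      · rw [if_neg hc]
        have hR : pvF (fun k => d.getD k 0)
              ((buy[j], price[j]) :: (buy.drop (j + 1)).zip (price.drop (j + 1)))
            = pvF (fun k => d.getD k 0) ((buy.drop (j + 1)).zip (price.drop (j + 1))) := by
          simp only [pvF]; rw [if_neg hc]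
        rw [hR, hcast, ih (j + 1) (by omega)]
    · have hr : PySem.List.pyRange (j : Int) (buy.length : Int) 1 = [] := by
        simp [PySem.List.pyRange]; omega
      rw [hr, List.drop_eq_nil_of_le (by omega : buy.length ≤ j)]
      simp [pvF]

-- B's result as the keyed sum over the first-occurrence key set
lemma pvB_eq_sum (shoes buy price : List Int) :
    calPrice_alt shoes buy price
      = ((PySem.Set.ofList ((buy.zip price).map Prod.fst)).map
          (fun k => pvTake ((PySem.Dict.counter shoes).getD k 0)
                           (pvPrices k (buy.zip price)))).sum := by
  unfold calPrice_alt
  set L := buy.zip price with hL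
  set stock := PySem.Dict.counter shoes with hstock
  set groups : PySem.Dict Int (List Int) :=
    L.foldl (fun g p => g.modify p.1 [] (· ++ [p.2])) PySem.Dict.empty with hgroups
  have hnd : groups.keys.Nodup := by
    rw [hgroups]
    exact PySem.Dict.nodup_keys_foldl_modify_key L Prod.fst []
      (fun _ p => fun v => v ++ [p.2]) PySem.Dict.empty
      (by rw [PySem.Dict.keys_empty]; exact List.nodup_nil)
  have hkeys : groups.keys = PySem.Set.ofList (L.map Prod.fst) := by
    rw [hgroups, PySem.Dict.keys_foldl_modify_key]
    simp [PySem.Dict.keys_empty, PySem.Set.update, PySem.Set.ofList_eq_foldl]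
  have hget : ∀ k, groups.getD k [] = pvPrices k L := by
    intro k
    rw [hgroups, PySem.Dict.getD_foldl_modify_append]
    simp [PySem.Dict.getD_empty, pvPrices]
  rw [PySem.List.foldl_add
    (g := fun kv : Int × List Int => (PySem.List.slice kv.2 none (some (stock.getD kv.1 0))).sum)]
  rw [PySem.Dict.items_eq_map_keys groups hnd []]
  rw [hkeys]
  simp only [List.map_map, zero_add]
  refine congrArg _ (List.map_congr_left fun k _ => ?_)
  simp only [Function.comp]
  rw [hget k]
  have hcnt : stock.getD k 0 = ((shoes.count k : Nat) : Int) := by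
    rw [hstock, PySem.Dict.getD_counter]
  rw [hcnt, PySem.List.slice_to_natCast]
  simp [pvTake]

-- membership / nodup facts about the key set
lemma pv_keyset_cover (L : List (Int × Int)) :
    ∀ p ∈ L, p.1 ∈ PySem.Set.ofList (L.map Prod.fst) := by
  intro p hp
  rw [PySem.Set.mem_ofList]
  exact List.mem_map_of_mem hp

-- ===== VERDICT (by name: the statement is the Claim_ definition above) =====
theorem calPrice_spec : Claim_equal_calPrice := by
  intro shoes buy price _ hpre
  unfold Spec_calPrice
  have hA : calPrice shoes buy price
      = pvF (fun k => (PySem.Dict.counter shoes).getD k 0) (buy.zip price) := by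
    unfold calPrice
    have := pvA_loop buy price hpre buy.length 0 (by omega) 0 (PySem.Dict.counter shoes)
    simpa using this
  rw [hA, pvB_eq_sum]
  exact pvF_eq_sum (buy.zip price) _
    (fun x => by rw [PySem.Dict.getD_counter]; positivity)
    _ (PySem.Set.nodup_ofList _) (pv_keyset_cover _)
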